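-- pv_equiv track=rewrite | github.com/mario-barros/python-dio | atendimento_medico.py | ordena_fila
-- ===== SOURCE A (Python) =====
-- def ordena_fila(pessoas):
--     urgente = []
--     idosos = []
--     demais = []
--
--     for nome, idade, status in pessoas:
--         if status.lower() == "urgente":
--             urgente.append((nome, idade, status))
--         elif idade >= 60:
--             idosos.append((nome, idade, status))
--         else:
--             demais.append((nome, idade, status))
--
--     urgente.sort(key=lambda pessoa: pessoa[1], reverse=True)
--     idosos.sort(key=lambda pessoa: pessoa[1], reverse=True)
--
--     return urgente + idosos + demais
-- ===== SOURCE B (Python) =====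
-- def ordena_fila(pessoas):
--     def chave(pessoa):
--         nome, idade, status = pessoa
--         if status.lower() == "urgente":
--             rank = 0
--         elif idade >= 60:
--             rank = 1
--         else:
--             rank = 2
--         return (rank, -idade if rank < 2 else 0)
--     return sorted(pessoas, key=chave)
-- ===== Notes on version B (the rewrite author's own statement) =====
-- stated objective: idiomatic
-- what changed: Replaced the three-list partition plus two in-place reverse sorts with a single stable sorted() call keyed by (rank, -idade or 0), relying on sort stability to keep the 'others' group in insertion order.
import Mathlib
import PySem

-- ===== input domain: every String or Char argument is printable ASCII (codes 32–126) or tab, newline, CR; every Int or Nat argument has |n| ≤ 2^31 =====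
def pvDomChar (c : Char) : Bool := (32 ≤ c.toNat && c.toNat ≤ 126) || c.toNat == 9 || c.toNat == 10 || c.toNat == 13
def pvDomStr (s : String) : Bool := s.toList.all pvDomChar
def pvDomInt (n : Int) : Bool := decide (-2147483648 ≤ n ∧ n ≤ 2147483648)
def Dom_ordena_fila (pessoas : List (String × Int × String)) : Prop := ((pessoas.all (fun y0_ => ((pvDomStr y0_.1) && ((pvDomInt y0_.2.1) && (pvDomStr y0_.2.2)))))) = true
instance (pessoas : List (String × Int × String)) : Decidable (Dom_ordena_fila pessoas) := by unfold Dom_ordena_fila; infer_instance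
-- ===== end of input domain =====

-- B replaces A's three-list partition + two reverse sorts with one stable sorted-by-key pass (idiomatic decomposition; return value proved equal).

-- ===== PORT A =====
def ordena_fila (pessoas : List (String × Int × String)) : List (String × Int × String) :=
  let t := pessoas.foldl
    (fun (acc : List (String × Int × String) × List (String × Int × String) × List (String × Int × String)) p =>
      if PySem.Str.lower p.2.2 = "urgente" then (acc.1 ++ [p], acc.2.1, acc.2.2)
      else if p.2.1 ≥ 60 then (acc.1, acc.2.1 ++ [p], acc.2.2)
      else (acc.1, acc.2.1, acc.2.2 ++ [p]))
    ([], [], [])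
  PySem.List.sorted t.1 (fun p => p.2.1) true ++ PySem.List.sorted t.2.1 (fun p => p.2.1) true ++ t.2.2

-- ===== PORT B =====
-- chave: rank 0 = urgente, 1 = idoso (idade ≥ 60), 2 = demais; secondary -idade for ranks 0,1, constant 0 for rank 2
def pvRank (p : String × Int × String) : Int :=
  if PySem.Str.lower p.2.2 = "urgente" then 0 else if p.2.1 ≥ 60 then 1 else 2

def pvSec (p : String × Int × String) : Int :=
  if pvRank p < 2 then -p.2.1 else 0

def ordena_fila_alt (pessoas : List (String × Int × String)) : List (String × Int × String) :=
  PySem.List.sorted2 pessoas pvRank pvSec false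

-- ===== PRECONDITION & SPEC =====
def Spec_ordena_fila (pessoas : List (String × Int × String)) (out : List (String × Int × String)) : Prop := out = ordena_fila_alt pessoas
instance (pessoas : List (String × Int × String)) (out : List (String × Int × String)) : Decidable (Spec_ordena_fila pessoas out) := by unfold Spec_ordena_fila; infer_instance

-- ===== CLAIM (what is proved, stated in full; the proofs are below) =====
def Claim_equal_ordena_fila : Prop := ∀ (pessoas : List (String × Int × String)), Dom_ordena_fila pessoas → Spec_ordena_fila pessoas (ordena_fila pessoas)

-- ===== LEMMAS AND PROOFS =====

-- the comparator of B's tuple-key sort, and the plain comparators it specialises to per rank group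
def pvB2 (a b : String × Int × String) : Bool :=
  decide (pvRank a < pvRank b) || (!decide (pvRank b < pvRank a) && decide (pvSec a < pvSec b))

def pvBS (a b : String × Int × String) : Bool := decide (pvSec a < pvSec b)

lemma insertBy_nil {α : Type} (before : α → α → Bool) (x : α) :
    PySem.List.insertBy before x [] = [x] := rfl

lemma insertBy_cons {α : Type} (before : α → α → Bool) (x y : α) (ys : List α) :
    PySem.List.insertBy before x (y :: ys) =
      if before x y then x :: y :: ys else y :: PySem.List.insertBy before x ys := rfl

lemma insertBy_all_before {α : Type} (before : α → α → Bool) (x : α) (l : List α)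
    (h : ∀ y ∈ l, before x y = true) : PySem.List.insertBy before x l = x :: l := by
  cases l with
  | nil => rfl
  | cons y ys => rw [insertBy_cons, h y (by simp)]; simp

lemma insertBy_append_of_not {α : Type} (before : α → α → Bool) (x : α) (ys zs : List α)
    (h : ∀ y ∈ ys, before x y = false) :
    PySem.List.insertBy before x (ys ++ zs) = ys ++ PySem.List.insertBy before x zs := by
  induction ys with
  | nil => simp
  | cons y ys ih =>
    rw [List.cons_append, insertBy_cons, h y (by simp)]
    simp only [Bool.false_eq_true, if_false, List.cons_append]
    rw [ih (fun y hy => h y (by simp [hy]))]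

lemma insertBy_congr {α : Type} (before before' : α → α → Bool) (x : α) (ys : List α)
    (h : ∀ y ∈ ys, before x y = before' x y) :
    PySem.List.insertBy before x ys = PySem.List.insertBy before' x ys := by
  induction ys with
  | nil => rfl
  | cons y ys ih =>
    rw [insertBy_cons, insertBy_cons, h y (by simp), ih (fun y hy => h y (by simp [hy]))]

lemma pvRank_cases (p : String × Int × String) : pvRank p = 0 ∨ pvRank p = 1 ∨ pvRank p = 2 := by
  unfold pvRank; split_ifs <;> simp

lemma pvSec_of_rank2 (p : String × Int × String) (h : pvRank p = 2) : pvSec p = 0 := by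
  unfold pvSec; rw [h]; simp

-- inserting a rank-0 element into s0 ++ s1 ++ s2
lemma pv_step0 (x : String × Int × String) (hx : pvRank x = 0) :
    ∀ (s0 s1 s2 : List (String × Int × String)),
      (∀ y ∈ s0, pvRank y = 0) → (∀ y ∈ s1, pvRank y = 1) → (∀ y ∈ s2, pvRank y = 2) →
      PySem.List.insertBy pvB2 x (s0 ++ s1 ++ s2) = PySem.List.insertBy pvBS x s0 ++ s1 ++ s2 := by
  intro s0
  induction s0 with
  | nil =>
    intro s1 s2 _ h1 h2
    simp only [List.nil_append, insertBy_nil]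
    have hall : ∀ y ∈ s1 ++ s2, pvB2 x y = true := by
      intro y hy
      rcases List.mem_append.mp hy with hy | hy
      · simp [pvB2, hx, h1 y hy]
      · simp [pvB2, hx, h2 y hy]
    rw [insertBy_all_before _ _ _ hall]
    simp
  | cons y s0 ih =>
    intro s1 s2 h0 h1 h2
    have hy0 : pvRank y = 0 := h0 y (by simp)
    have hb : pvB2 x y = pvBS x y := by simp [pvB2, pvBS, hx, hy0]
    simp only [List.cons_append, insertBy_cons, hb]
    by_cases h : pvBS x y = true
    · simp [h]
    · simp only [Bool.not_eq_true] at h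
      simp only [h, Bool.false_eq_true, if_false, List.cons_append]
      rw [ih s1 s2 (fun z hz => h0 z (by simp [hz])) h1 h2]

-- inserting a rank-1 element
lemma pv_step1 (x : String × Int × String) (hx : pvRank x = 1) :
    ∀ (s0 s1 s2 : List (String × Int × String)),
      (∀ y ∈ s0, pvRank y = 0) → (∀ y ∈ s1, pvRank y = 1) → (∀ y ∈ s2, pvRank y = 2) →
      PySem.List.insertBy pvB2 x (s0 ++ s1 ++ s2) = s0 ++ PySem.List.insertBy pvBS x s1 ++ s2 := by
  intro s0 s1 s2 h0 h1 h2
  rw [List.append_assoc, insertBy_append_of_not pvB2 x s0 (s1 ++ s2)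
      (fun y hy => by simp [pvB2, hx, h0 y hy])]
  have main : ∀ (t1 : List (String × Int × String)), (∀ y ∈ t1, pvRank y = 1) →
      PySem.List.insertBy pvB2 x (t1 ++ s2) = PySem.List.insertBy pvBS x t1 ++ s2 := by
    intro t1
    induction t1 with
    | nil =>
      intro _
      simp only [List.nil_append, insertBy_nil]
      have hall : ∀ y ∈ s2, pvB2 x y = true := by
        intro y hy; simp [pvB2, hx, h2 y hy]
      rw [insertBy_all_before _ _ _ hall]
      simp
    | cons y t1 ih =>
      intro h1'
      have hy1 : pvRank y = 1 := h1' y (by simp)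
      have hb : pvB2 x y = pvBS x y := by simp [pvB2, pvBS, hx, hy1]
      simp only [List.cons_append, insertBy_cons, hb]
      by_cases h : pvBS x y = true
      · simp [h]
      · simp only [Bool.not_eq_true] at h
        simp only [h, Bool.false_eq_true, if_false, List.cons_append]
        rw [ih (fun z hz => h1' z (by simp [hz]))]
  rw [main s1 h1, ← List.append_assoc]

-- inserting a rank-2 element: it goes to the very end
lemma pv_step2 (x : String × Int × String) (hx : pvRank x = 2) :
    ∀ (s0 s1 s2 : List (String × Int × String)),
      (∀ y ∈ s0, pvRank y = 0) → (∀ y ∈ s1, pvRank y = 1) → (∀ y ∈ s2, pvRank y = 2) →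
      PySem.List.insertBy pvB2 x (s0 ++ s1 ++ s2) = s0 ++ s1 ++ (s2 ++ [x]) := by
  intro s0 s1 s2 h0 h1 h2
  rw [PySem.List.insertBy_of_forall_not_before]
  · simp
  · intro y hy
    rcases List.mem_append.mp hy with hy | hy
    · rcases List.mem_append.mp hy with hy | hy
      · simp [pvB2, hx, h0 y hy]
      · simp [pvB2, hx, h1 y hy]
    · simp [pvB2, hx, h2 y hy, pvSec_of_rank2 x hx, pvSec_of_rank2 y (h2 y hy)]

-- B's single stable tuple-key insertion sort = the three rank groups, the first two sorted by pvSec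
lemma pv_main : ∀ (l s0 s1 s2 : List (String × Int × String)),
    (∀ y ∈ s0, pvRank y = 0) → (∀ y ∈ s1, pvRank y = 1) → (∀ y ∈ s2, pvRank y = 2) →
    l.foldl (fun acc x => PySem.List.insertBy pvB2 x acc) (s0 ++ s1 ++ s2)
      = (l.filter (fun p => pvRank p == 0)).foldl (fun acc x => PySem.List.insertBy pvBS x acc) s0
        ++ (l.filter (fun p => pvRank p == 1)).foldl (fun acc x => PySem.List.insertBy pvBS x acc) s1
        ++ (s2 ++ l.filter (fun p => pvRank p == 2)) := by
  intro l
  induction l with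
  | nil => intro s0 s1 s2 _ _ _; simp
  | cons x l ih =>
    intro s0 s1 s2 h0 h1 h2
    rcases pvRank_cases x with hx | hx | hx
    · simp only [List.foldl_cons, List.filter_cons, hx]
      norm_num
      rw [← List.append_assoc, pv_step0 x hx s0 s1 s2 h0 h1 h2,
        ih (PySem.List.insertBy pvBS x s0) s1 s2
          (fun y hy => by rcases (PySem.List.mem_insertBy pvBS x y s0).mp hy with h | h
                          · rw [h]; exact hx
                          · exact h0 y h)
          h1 h2]
      simp
    · simp only [List.foldl_cons, List.filter_cons, hx]
      norm_num
      rw [← List.append_assoc, pv_step1 x hx s0 s1 s2 h0 h1 h2,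
        ih s0 (PySem.List.insertBy pvBS x s1) s2 h0
          (fun y hy => by rcases (PySem.List.mem_insertBy pvBS x y s1).mp hy with h | h
                          · rw [h]; exact hx
                          · exact h1 y h)
          h2]
      simp
    · simp only [List.foldl_cons, List.filter_cons, hx]
      norm_num
      rw [← List.append_assoc, pv_step2 x hx s0 s1 s2 h0 h1 h2,
        ih s0 s1 (s2 ++ [x]) h0 h1
          (fun y hy => by rcases List.mem_append.mp hy with h | h
                          · exact h2 y h
                          · rw [List.mem_singleton.mp h]; exact hx)]
      simp

-- two insertion-sort folds with comparators agreeing on a property closed over the inputs coincide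
lemma foldl_insertBy_congr {α : Type} (before before' : α → α → Bool) (P : α → Prop)
    (hbb : ∀ a b, P a → P b → before a b = before' a b) :
    ∀ (l acc : List α), (∀ y ∈ l, P y) → (∀ y ∈ acc, P y) →
      l.foldl (fun a x => PySem.List.insertBy before x a) acc
        = l.foldl (fun a x => PySem.List.insertBy before' x a) acc := by
  intro l
  induction l with
  | nil => intro acc _ _; rfl
  | cons x l ih =>
    intro acc hl hacc
    have hx : P x := hl x (by simp)
    simp only [List.foldl_cons]
    rw [insertBy_congr before before' x acc (fun y hy => hbb x y hx (hacc y hy))]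
    exact ih (PySem.List.insertBy before' x acc)
      (fun y hy => hl y (by simp [hy]))
      (fun y hy => by rcases (PySem.List.mem_insertBy before' x y acc).mp hy with h | h
                      · rw [h]; exact hx
                      · exact hacc y h)

-- reverse sort by idade = ascending sort by pvSec, on lists whose elements all have rank ≠ 2
lemma sortedRev_eq_sortedSec (xs : List (String × Int × String)) (h : ∀ p ∈ xs, pvRank p ≠ 2) :
    PySem.List.sorted xs (fun p => p.2.1) true = PySem.List.sorted xs pvSec false := by
  rw [PySem.List.sorted_rev_eq_foldl_insertBy, PySem.List.sorted_eq_foldl_insertBy]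
  exact foldl_insertBy_congr _ _ (fun p => pvRank p ≠ 2)
    (fun a b ha hb => by
      have ha2 : pvRank a < 2 := by rcases pvRank_cases a with h' | h' | h' <;> omega
      have hb2 : pvRank b < 2 := by rcases pvRank_cases b with h' | h' | h' <;> omega
      have : pvSec a = -a.2.1 := by unfold pvSec; rw [if_pos ha2]
      have hsb : pvSec b = -b.2.1 := by unfold pvSec; rw [if_pos hb2]
      rw [this, hsb]
      simp)
    xs [] h (by simp)

-- A's partition loop computes the three rank filters
lemma partA : ∀ (l : List (String × Int × String))
    (u i d : List (String × Int × String)),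
    l.foldl
      (fun (acc : List (String × Int × String) × List (String × Int × String) × List (String × Int × String)) p =>
        if PySem.Str.lower p.2.2 = "urgente" then (acc.1 ++ [p], acc.2.1, acc.2.2)
        else if p.2.1 ≥ 60 then (acc.1, acc.2.1 ++ [p], acc.2.2)
        else (acc.1, acc.2.1, acc.2.2 ++ [p]))
      (u, i, d)
    = (u ++ l.filter (fun p => pvRank p == 0),
       i ++ l.filter (fun p => pvRank p == 1),
       d ++ l.filter (fun p => pvRank p == 2)) := by
  intro l
  induction l with
  | nil => intro u i d; simp
  | cons x l ih =>
    intro u i d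
    by_cases hc1 : PySem.Str.lower x.2.2 = "urgente"
    · have hr : pvRank x = 0 := by unfold pvRank; rw [if_pos hc1]
      simp only [List.foldl_cons, if_pos hc1, List.filter_cons, hr]
      norm_num
      rw [ih]
      simp
    · by_cases hc2 : x.2.1 ≥ 60
      · have hr : pvRank x = 1 := by unfold pvRank; rw [if_neg hc1, if_pos hc2]
        simp only [List.foldl_cons, if_neg hc1, if_pos hc2, List.filter_cons, hr]
        norm_num
        rw [ih]
        simp
      · have hr : pvRank x = 2 := by unfold pvRank; rw [if_neg hc1, if_neg hc2]
        simp only [List.foldl_cons, if_neg hc1, if_neg hc2, List.filter_cons, hr]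
        norm_num
        rw [ih]
        simp

lemma alt_eq_foldl (l : List (String × Int × String)) :
    ordena_fila_alt l = l.foldl (fun acc x => PySem.List.insertBy pvB2 x acc) [] := rfl

lemma mem_filter_rank (l : List (String × Int × String)) (k : Int) (p : String × Int × String)
    (hp : p ∈ l.filter (fun q => pvRank q == k)) : pvRank p = k := by
  have := List.of_mem_filter hp
  simpa using this

-- ===== VERDICT (by name: the statement is the Claim_ definition above) =====
theorem ordena_fila_spec : Claim_equal_ordena_fila := by
  intro l _
  unfold Spec_ordena_fila
  show ordena_fila l = ordena_fila_alt l
  rw [alt_eq_foldl]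
  have hmain := pv_main l [] [] [] (by simp) (by simp) (by simp)
  simp only [List.append_nil, List.nil_append] at hmain
  rw [hmain]
  unfold ordena_fila
  rw [partA l [] [] []]
  simp only [List.nil_append]
  rw [sortedRev_eq_sortedSec _ (fun p hp => by rw [mem_filter_rank l 0 p hp]; decide),
      sortedRev_eq_sortedSec _ (fun p hp => by rw [mem_filter_rank l 1 p hp]; decide),
      PySem.List.sorted_eq_foldl_insertBy, PySem.List.sorted_eq_foldl_insertBy]
  rfl
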